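-- pv_equiv track=rewrite | github.com/wahab-cide/DSA-Specialization | NeetCode/arraysAndHashing.py | multiAccountCheating
-- ===== SOURCE A (Python) =====
-- def multiAccountCheating(users):
--     uniqueLists = set()
--
--     for _, ips in users:
--         immutableList = tuple(sorted(ips))
--         if immutableList in uniqueLists:
--             return True
--         uniqueLists.add(immutableList)
--     return False
-- ===== SOURCE B (Python) =====
-- def multiAccountCheating(users):
--     keys = sorted(tuple(sorted(ips)) for _, ips in users)
--     return any(a == b for a, b in zip(keys, keys[1:]))
-- ===== Notes on version B (the rewrite author's own statement) =====
-- stated objective: alternative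
-- what changed: Replaces the hash-set scan with early return by sort-all-canonical-keys then a single adjacent-equality pass over the sorted key list (no set at all).
import Mathlib
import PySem

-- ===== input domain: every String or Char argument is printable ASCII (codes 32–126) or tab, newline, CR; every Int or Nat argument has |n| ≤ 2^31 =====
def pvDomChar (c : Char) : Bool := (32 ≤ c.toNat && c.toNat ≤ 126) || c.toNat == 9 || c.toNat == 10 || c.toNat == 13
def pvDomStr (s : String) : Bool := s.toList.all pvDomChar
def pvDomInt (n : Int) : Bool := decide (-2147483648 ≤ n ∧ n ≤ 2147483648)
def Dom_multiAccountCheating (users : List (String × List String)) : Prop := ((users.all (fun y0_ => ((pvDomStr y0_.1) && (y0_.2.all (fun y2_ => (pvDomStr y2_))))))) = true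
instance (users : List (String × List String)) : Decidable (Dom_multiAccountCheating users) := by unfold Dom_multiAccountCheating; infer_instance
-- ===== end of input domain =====

-- B replaces A's hash-set scan with sort-all-canonical-keys then one adjacent-equality pass (alternative decomposition, same cost class).


-- ===== PORT A =====
-- loop 'for _, ips in users' with the set accumulator 'uniqueLists', early return True on a hit
def pvLoopA : List (String × List String) → PySem.Set (List String) → Bool
  | [], _ => false
  | (_, ips) :: rest, uniqueLists =>
    let immutableList := PySem.List.sorted ips (fun x => x)
    if PySem.Set.contains uniqueLists immutableList then true
    else pvLoopA rest (PySem.Set.add uniqueLists immutableList)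

def multiAccountCheating (users : List (String × List String)) : Bool :=
  pvLoopA users PySem.Set.empty

-- ===== PORT B =====
def multiAccountCheating_alt (users : List (String × List String)) : Bool :=
  let keys := PySem.List.sorted (users.map (fun u => PySem.List.sorted u.2 (fun x => x))) (fun x => x)
  (keys.zip (PySem.List.slice keys (some 1) none)).any (fun p => p.1 == p.2)

-- ===== PRECONDITION & SPEC =====
def Spec_multiAccountCheating (users : List (String × List String)) (out : Bool) : Prop := out = multiAccountCheating_alt users
instance (users : List (String × List String)) (out : Bool) : Decidable (Spec_multiAccountCheating users out) := by unfold Spec_multiAccountCheating; infer_instance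

-- ===== CLAIM (what is proved, stated in full; the proofs are below) =====
def Claim_equal_multiAccountCheating : Prop := ∀ (users : List (String × List String)), Dom_multiAccountCheating users → Spec_multiAccountCheating users (multiAccountCheating users)

-- ===== LEMMAS AND PROOFS =====

-- the canonical key of one user
def pvKey (u : String × List String) : List String := PySem.List.sorted u.2 (fun x => x)

-- A's loop answers: some key of the remaining users is already seen, or the remaining keys repeat
theorem pvLoopA_spec (us : List (String × List String)) (seen : List (List String))
    (hnd : seen.Nodup) :
    pvLoopA us seen = !decide ((seen ++ us.map pvKey).Nodup) := by
  induction us generalizing seen with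
  | nil => simp [pvLoopA, hnd]
  | cons u rest ih =>
    obtain ⟨name, ips⟩ := u
    by_cases hmem : PySem.List.sorted ips (fun x => x) ∈ seen
    · have hdup : ¬ (seen ++ pvKey (name, ips) :: rest.map pvKey).Nodup := by
        intro h
        exact (List.disjoint_of_nodup_append h) hmem (by simp [pvKey])
      simp [pvLoopA, PySem.Set.contains, hmem, hdup]
    · have hc : PySem.Set.contains seen (PySem.List.sorted ips (fun x => x)) = false := by
        simp [PySem.Set.contains, hmem]
      have hadd : PySem.Set.add seen (PySem.List.sorted ips (fun x => x))
          = seen ++ [PySem.List.sorted ips (fun x => x)] := by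
        simp [PySem.Set.add, PySem.Set.contains, hmem]
      have hnd' : (seen ++ [PySem.List.sorted ips (fun x => x)]).Nodup := by
        simp [List.nodup_append, hnd]
        exact fun a ha h => hmem (h ▸ ha)
      have := ih (seen ++ [PySem.List.sorted ips (fun x => x)]) hnd'
      have happ : (seen ++ [PySem.List.sorted ips (fun x => x)]) ++ rest.map pvKey
          = seen ++ ((name, ips) :: rest).map pvKey := by
        simp [pvKey]
      rw [happ] at this
      simp [pvLoopA, hmem, this]

-- PySem.List.sorted is independent of the DecidableLT instance (Decidable is a subsingleton)
theorem pvSortedInst (xs : List (List String)) :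
    PySem.List.sorted xs (fun x => x) false
      = @PySem.List.sorted (List String) (List String) _ LinearOrder.toDecidableLT xs (fun x => x) false := by
  congr 1

-- in a ≤-sorted list, an adjacent duplicate exists iff the list is not Nodup
theorem pvAdjDup {α : Type} [LinearOrder α] [BEq α] [LawfulBEq α] (l : List α)
    (hp : l.Pairwise (· ≤ ·)) :
    ((l.zip l.tail).any (fun p => p.1 == p.2)) = !decide l.Nodup := by
  induction l with
  | nil => simp
  | cons a t ih =>
    cases t with
    | nil => simp
    | cons b t' =>
      have hp' : (b :: t').Pairwise (· ≤ ·) := hp.tail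
      have hab : a ≤ b := (List.pairwise_cons.mp hp).1 b (by simp)
      by_cases hEq : a = b
      · subst hEq
        simp
      · have hnotmem : a ∉ b :: t' := by
          intro hmem
          rcases List.mem_cons.mp hmem with h | h
          · exact hEq h
          · have hbx : b ≤ a := (List.pairwise_cons.mp hp').1 a h
            exact hEq (le_antisymm hab hbx)
        have := ih hp'
        simp only [List.tail_cons] at this ⊢
        simp [List.zip_cons_cons, hEq, this, List.nodup_cons, hnotmem]

-- ===== VERDICT (by name: the statement is the Claim_ definition above) =====
theorem multiAccountCheating_spec : Claim_equal_multiAccountCheating := by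
  intro users _
  unfold Spec_multiAccountCheating multiAccountCheating multiAccountCheating_alt
  rw [pvLoopA_spec users PySem.Set.empty (by simp [PySem.Set.empty])]
  have hperm : (PySem.List.sorted (users.map (fun u => PySem.List.sorted u.2 (fun x => x))) (fun x => x)).Perm
      (users.map pvKey) := by
    simpa [pvKey] using
      PySem.List.sorted_perm (users.map (fun u => PySem.List.sorted u.2 (fun x => x))) (fun x => x) false
  simp only [PySem.List.slice_from_one, PySem.Set.empty, List.nil_append, pvSortedInst]
  rw [pvAdjDup _ (PySem.List.sorted_pairwise (users.map (fun u => PySem.List.sorted u.2 (fun x => x))) (fun x => x))]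
  rw [← pvSortedInst]
  simp [hperm.nodup_iff]
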